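-- pv_equiv track=rewrite | github.com/aberdichevskaia/catalytic-sites-annotation | dataset_analysis/legacy/chemotypes_distribution.py | chemotype_from_residue_set
-- ===== SOURCE A (Python) =====
-- from typing import Dict, Set, Tuple, List
--
-- def chemotype_from_residue_set(residues: Set[str]) -> int:
--     """Return chemotype class 0..7 from a set of AA types at catalytic positions."""
--     if any(r in residues for r in "ILMVWF"):
--         return 0
--     if any(r in residues for r in "AGP"):
--         return 1
--     if any(r in residues for r in "QN"):
--         return 2
--     if any(r in residues for r in "KR"):
--         return 3
--     if "S" in residues:
--         return 4
--     if "T" in residues: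
--         return 5
--     if any(r in residues for r in "DE"):
--         return 6
--     return 7
-- ===== SOURCE B (Python) =====
-- AA_CLASS = {aa: k for k, grp in enumerate(("ILMVWF", "AGP", "QN", "KR", "S", "T", "DE")) for aa in grp}
--
-- def chemotype_from_residue_set(residues):
--     """Return chemotype class 0..7 from a set of AA types at catalytic positions."""
--     best = 7
--     for r in residues:
--         c = AA_CLASS.get(r)
--         if c is not None and c < best:
--             best = c
--     return best
-- ===== Notes on version B (the rewrite author's own statement) =====
-- stated objective: simpler
-- what changed: Replaces the cascade of seven group-membership scans over the input set with a precomputed amino-acid-to-class dict and a single pass over the residues keeping the minimum class (groups are disjoint, so minimum class = first matching group).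
import Mathlib
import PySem

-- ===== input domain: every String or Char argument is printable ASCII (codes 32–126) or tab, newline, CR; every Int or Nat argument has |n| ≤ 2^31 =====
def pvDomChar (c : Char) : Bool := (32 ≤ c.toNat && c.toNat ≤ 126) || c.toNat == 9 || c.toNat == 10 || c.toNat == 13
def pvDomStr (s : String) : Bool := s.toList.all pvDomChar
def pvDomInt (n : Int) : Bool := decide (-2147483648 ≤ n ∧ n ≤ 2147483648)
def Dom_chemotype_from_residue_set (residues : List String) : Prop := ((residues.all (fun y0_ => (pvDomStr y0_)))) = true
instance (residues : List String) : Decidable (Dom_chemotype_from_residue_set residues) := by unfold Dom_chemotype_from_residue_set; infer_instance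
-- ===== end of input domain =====

-- B replaces A's cascade of seven group-membership scans by one dict lookup per residue with a running minimum class (simpler, one pass).

-- ===== PORT A =====
-- any(r in residues for r in "ILMVWF") etc.: iterate the group's characters, test set membership.
def chemotype_from_residue_set (residues : List String) : Int :=
  if ["I", "L", "M", "V", "W", "F"].any (fun r => residues.contains r) then 0
  else if ["A", "G", "P"].any (fun r => residues.contains r) then 1
  else if ["Q", "N"].any (fun r => residues.contains r) then 2
  else if ["K", "R"].any (fun r => residues.contains r) then 3
  else if residues.contains "S" then 4
  else if residues.contains "T" then 5
  else if ["D", "E"].any (fun r => residues.contains r) then 6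
  else 7

-- ===== PORT B =====
-- AA_CLASS = {aa: class_index}, built once (Python dict comprehension → literal assoc list).
def aaClass : PySem.Dict String Int :=
  PySem.Dict.ofList [("I", 0), ("L", 0), ("M", 0), ("V", 0), ("W", 0), ("F", 0),
                     ("A", 1), ("G", 1), ("P", 1), ("Q", 2), ("N", 2), ("K", 3), ("R", 3),
                     ("S", 4), ("T", 5), ("D", 6), ("E", 6)]

-- best = 7; for r in residues: c = AA_CLASS.get(r); if c is not None and c < best: best = c
def chemotype_from_residue_set_alt (residues : List String) : Int :=
  residues.foldl
    (fun best r =>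
      match PySem.Dict.get? aaClass r with
      | some c => if c < best then c else best
      | none => best)
    7

-- ===== PRECONDITION & SPEC =====
def Spec_chemotype_from_residue_set (residues : List String) (out : Int) : Prop := out = chemotype_from_residue_set_alt residues
instance (residues : List String) (out : Int) : Decidable (Spec_chemotype_from_residue_set residues out) := by unfold Spec_chemotype_from_residue_set; infer_instance

-- ===== CLAIM (what is proved, stated in full; the proofs are below) =====
def Claim_equal_chemotype_from_residue_set : Prop := ∀ (residues : List String), Dom_chemotype_from_residue_set residues → Spec_chemotype_from_residue_set residues (chemotype_from_residue_set residues)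

-- ===== LEMMAS AND PROOFS =====

-- whether some residue of the set maps to class k
def occ (k : Int) (l : List String) : Bool := l.any (fun r => PySem.Dict.get? aaClass r == some k)

-- the value A computes, phrased through occ
def chain (l : List String) : Int :=
  if occ 0 l then 0 else if occ 1 l then 1 else if occ 2 l then 2
  else if occ 3 l then 3 else if occ 4 l then 4 else if occ 5 l then 5
  else if occ 6 l then 6 else 7

-- B's loop body as a named function
def bstep (best : Int) (r : String) : Int :=
  match PySem.Dict.get? aaClass r with
  | some c => if c < best then c else best
  | none => best

lemma aa_items : aaClass.items = [("I", (0:Int)), ("L", 0), ("M", 0), ("V", 0), ("W", 0), ("F", 0),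
    ("A", 1), ("G", 1), ("P", 1), ("Q", 2), ("N", 2), ("K", 3), ("R", 3),
    ("S", 4), ("T", 5), ("D", 6), ("E", 6)] := by decide

lemma aa_nodup : aaClass.keys.Nodup := by decide

lemma aa_get_iff (r : String) (k : Int) : PySem.Dict.get? aaClass r = some k ↔
    (r, k) ∈ ([("I", (0:Int)), ("L", 0), ("M", 0), ("V", 0), ("W", 0), ("F", 0),
    ("A", 1), ("G", 1), ("P", 1), ("Q", 2), ("N", 2), ("K", 3), ("R", 3),
    ("S", 4), ("T", 5), ("D", 6), ("E", 6)] : List (String × Int)) := by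
  rw [PySem.Dict.get?_eq_some_iff_mem_items aaClass r k aa_nodup, aa_items]

lemma get_range (r : String) (c : Int) (h : PySem.Dict.get? aaClass r = some c) :
    0 ≤ c ∧ c ≤ 6 := by
  have hm := (aa_get_iff r c).mp h
  simp only [List.mem_cons, List.not_mem_nil, or_false, Prod.mk.injEq] at hm
  rcases hm with ⟨_,h⟩|⟨_,h⟩|⟨_,h⟩|⟨_,h⟩|⟨_,h⟩|⟨_,h⟩|⟨_,h⟩|⟨_,h⟩|⟨_,h⟩|⟨_,h⟩|⟨_,h⟩|⟨_,h⟩|⟨_,h⟩|⟨_,h⟩|⟨_,h⟩|⟨_,h⟩|⟨_,h⟩ <;> omega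

lemma chain_le (l : List String) : chain l ≤ 7 := by
  unfold chain; split_ifs <;> omega

lemma bstep_le (b : Int) (r : String) : bstep b r ≤ b := by
  unfold bstep
  cases h : PySem.Dict.get? aaClass r with
  | none => exact le_refl b
  | some c => show (if c < b then c else b) ≤ b; split_ifs <;> omega

lemma bstep_min (b : Int) (r : String) (hb : b ≤ 7) : bstep b r = min b (bstep 7 r) := by
  unfold bstep
  cases h : PySem.Dict.get? aaClass r with
  | none => show b = min b 7; omega
  | some c =>
    obtain ⟨h0, h6⟩ := get_range r c h
    show (if c < b then c else b) = min b (if c < 7 then c else 7)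
    split_ifs <;> omega

lemma loop_min (l : List String) (b : Int) (hb : b ≤ 7) :
    l.foldl bstep b = min b (l.foldl bstep 7) := by
  induction l generalizing b with
  | nil => simp only [List.foldl_nil]; omega
  | cons r l ih =>
    simp only [List.foldl_cons]
    rw [ih (bstep b r) (le_trans (bstep_le b r) hb),
        ih (bstep 7 r) (bstep_le 7 r), bstep_min b r hb]
    omega

lemma loop_eq_chain (l : List String) : l.foldl bstep 7 = chain l := by
  induction l with
  | nil => simp [chain, occ]
  | cons r l ih =>
    simp only [List.foldl_cons]
    rw [loop_min l (bstep 7 r) (bstep_le 7 r), ih]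
    have hocc : ∀ k, occ k (r :: l) =
        ((PySem.Dict.get? aaClass r == some k) || occ k l) := by
      intro k; simp [occ]
    cases h : PySem.Dict.get? aaClass r with
    | none =>
      have hb : bstep 7 r = 7 := by unfold bstep; rw [h]
      have hc : chain (r :: l) = chain l := by
        unfold chain; simp only [hocc, h]; simp
      rw [hb, hc]
      have := chain_le l; omega
    | some c =>
      obtain ⟨h0, h6⟩ := get_range r c h
      have hb : bstep 7 r = c := by
        unfold bstep; rw [h]; show (if c < 7 then c else 7) = c; split_ifs <;> omega
      rw [hb]
      unfold chain
      simp only [hocc, h]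
      interval_cases c <;> simp <;> (try split_ifs) <;> omega

lemma chemA_eq_chain (l : List String) : chemotype_from_residue_set l = chain l := by
  have key : ∀ (k : Int) (grp : List String),
      (∀ r : String, PySem.Dict.get? aaClass r = some k ↔ r ∈ grp) →
      grp.any (fun r => l.contains r) = occ k l := by
    intro k grp hgrp
    rw [Bool.eq_iff_iff]
    simp only [occ, List.any_eq_true, List.contains_iff_mem, beq_iff_eq, hgrp]
    constructor
    · rintro ⟨g, hg, hmem⟩; exact ⟨g, hmem, hg⟩
    · rintro ⟨g, hg, hmem⟩; exact ⟨g, hmem, hg⟩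
  have h4 : l.contains "S" = occ 4 l := by
    rw [← key 4 ["S"] (by intro r; rw [aa_get_iff r 4]; simp; try tauto)]
    simp
  have h5 : l.contains "T" = occ 5 l := by
    rw [← key 5 ["T"] (by intro r; rw [aa_get_iff r 5]; simp; try tauto)]
    simp
  unfold chemotype_from_residue_set chain
  rw [key 0 ["I", "L", "M", "V", "W", "F"] (by intro r; rw [aa_get_iff r 0]; simp; try tauto),
      key 1 ["A", "G", "P"] (by intro r; rw [aa_get_iff r 1]; simp; try tauto),
      key 2 ["Q", "N"] (by intro r; rw [aa_get_iff r 2]; simp; try tauto),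
      key 3 ["K", "R"] (by intro r; rw [aa_get_iff r 3]; simp; try tauto),
      key 6 ["D", "E"] (by intro r; rw [aa_get_iff r 6]; simp; try tauto),
      h4, h5]

-- ===== VERDICT (by name: the statement is the Claim_ definition above) =====
theorem chemotype_from_residue_set_spec : Claim_equal_chemotype_from_residue_set := by
  intro residues _
  unfold Spec_chemotype_from_residue_set
  have hB : chemotype_from_residue_set_alt residues = residues.foldl bstep 7 := rfl
  rw [hB, loop_eq_chain, chemA_eq_chain]
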